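-- pv_equiv track=rewrite | github.com/Zoosd/flow-equations | flowequations/ODEs/tensor_transformations.py | build_index_dictionary
-- ===== SOURCE A (Python) =====
-- class indexdict(dict):
--     """ Dictionary with missing key exception """
--
--     def __init__(self, *args, **kwargs):
--         super().__init__(*args, **kwargs)
--
--     def __missing__(self,key):
--         raise Exception(f"Key missing. ")
--
-- def build_index_dictionary(L:int) -> indexdict:
--     """ Construct index dictionary for a system of :math:`L` sites
--
--     Args:
--         L (int): Number of sites in the system
--
--     Returns:
--         indexdict: Dictionary with keys :math:`(i,j)` and values corresponding to the index of the :math:`(i,j)`'th element in a flattened matrix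
--     """
--     index_dictionary = indexdict()
--     c = 0
--     for i in range(L):
--         for j in range(i):
--             index_dictionary.update({(i,j): c})
--             c += 1
--     return index_dictionary
-- ===== SOURCE B (Python) =====
-- class indexdict(dict):
--     """ Dictionary with missing key exception """
--
--     def __init__(self, *args, **kwargs):
--         super().__init__(*args, **kwargs)
--
--     def __missing__(self, key):
--         raise Exception(f"Key missing. ")
--
-- def build_index_dictionary(L: int) -> indexdict:
--     # Closed form: the pair (i, j) with j < i sits at flattened position
--     # i*(i-1)//2 + j, so each value is computed directly from its coordinates
--     # instead of threading a running counter through the loops.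
--     index_dictionary = indexdict()
--     index_dictionary.update(
--         ((i, j), i * (i - 1) // 2 + j) for i in range(L) for j in range(i))
--     return index_dictionary
-- ===== Notes on version B (the rewrite author's own statement) =====
-- stated objective: simpler
-- what changed: Replaced the counter threaded through the nested loops by the closed-form position i*(i-1)//2 + j, so the whole dictionary is one comprehension with each value computed directly from its coordinates.
import Mathlib
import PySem

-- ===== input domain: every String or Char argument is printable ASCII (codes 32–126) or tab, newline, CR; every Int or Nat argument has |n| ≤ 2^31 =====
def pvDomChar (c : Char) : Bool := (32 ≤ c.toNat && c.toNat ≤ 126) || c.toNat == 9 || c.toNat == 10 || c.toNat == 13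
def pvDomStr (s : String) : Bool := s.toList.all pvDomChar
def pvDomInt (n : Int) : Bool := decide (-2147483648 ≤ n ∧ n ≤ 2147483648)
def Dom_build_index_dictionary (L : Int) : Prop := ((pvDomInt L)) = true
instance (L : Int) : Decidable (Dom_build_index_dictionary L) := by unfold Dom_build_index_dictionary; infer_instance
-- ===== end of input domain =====

-- B replaces A's running counter by the closed form i*(i-1)//2 + j (simpler: one comprehension, no threaded state).

-- ===== PORT A =====
-- nested loops updating a dict with a running counter c
def build_index_dictionary (L : Int) : List (Int × Int × Int) :=
  let st := (PySem.List.pyRange 0 L 1).foldl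
    (fun (st : PySem.Dict (Int × Int) Int × Int) i =>
      (PySem.List.pyRange 0 i 1).foldl (fun st j => (st.1.insert (i, j) st.2, st.2 + 1)) st)
    (PySem.Dict.empty, 0)
  st.1.items.map (fun p => (p.1.1, p.1.2, p.2))

-- ===== PORT B =====
-- dict comprehension with the closed-form value; keys are pairwise distinct so it is the key-value list
def build_index_dictionary_alt (L : Int) : List (Int × Int × Int) :=
  (PySem.List.pyRange 0 L 1).flatMap
    (fun i => (PySem.List.pyRange 0 i 1).map
      (fun j => (i, j, PySem.Int.floordiv (i * (i - 1)) 2 + j)))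

-- ===== PRECONDITION & SPEC =====
def Spec_build_index_dictionary (L : Int) (out : List (Int × Int × Int)) : Prop := out = build_index_dictionary_alt L
instance (L : Int) (out : List (Int × Int × Int)) : Decidable (Spec_build_index_dictionary L out) := by unfold Spec_build_index_dictionary; infer_instance

-- ===== CLAIM (what is proved, stated in full; the proofs are below) =====
def Claim_equal_build_index_dictionary : Prop := ∀ (L : Int), Dom_build_index_dictionary L → Spec_build_index_dictionary L (build_index_dictionary L)

-- ===== LEMMAS AND PROOFS =====

-- the association list A's dict holds after processing rows 0..n-1, with closed-form values
def pvPairs (n : Nat) : List ((Int × Int) × Int) :=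
  (PySem.List.pyRange 0 (n : Int) 1).flatMap
    (fun i => (PySem.List.pyRange 0 i 1).map
      (fun j => ((i, j), PySem.Int.floordiv (i * (i - 1)) 2 + j)))

theorem pvPairs_key_lt {n : Nat} {p : (Int × Int) × Int} (h : p ∈ pvPairs n) : p.1.1 < (n : Int) := by
  rcases List.mem_flatMap.mp h with ⟨i, hi, hp⟩
  rcases List.mem_map.mp hp with ⟨j, _, rfl⟩
  exact (PySem.List.mem_pyRange_one.mp hi).2

theorem pv_insert_fresh (l : List ((Int × Int) × Int)) (k : Int × Int) (v : Int)
    (h : ((PySem.Dict.mk l).contains k) = false) :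
    (PySem.Dict.mk l).insert k v = PySem.Dict.mk (l ++ [(k, v)]) := by
  apply PySem.Dict.ext
  simpa using PySem.Dict.items_insert_of_not_contains _ v h

-- one inner loop over range(i), starting from dict l and counter c, appends the row and advances c by i
theorem pv_inner (i : Int) (k : Nat) (l : List ((Int × Int) × Int)) (c : Int)
    (hfresh : ∀ p ∈ l, p.1.1 ≠ i) :
    (PySem.List.pyRange 0 (k : Int) 1).foldl
      (fun (st : PySem.Dict (Int × Int) Int × Int) j => (st.1.insert (i, j) st.2, st.2 + 1))
      (PySem.Dict.mk l, c)
    = (PySem.Dict.mk (l ++ (PySem.List.pyRange 0 (k : Int) 1).map (fun j => ((i, j), c + j))), c + k) := by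
  induction k with
  | zero => simp [PySem.List.pyRange_one_eq_nil]
  | succ k ih =>
    have hsr : PySem.List.pyRange 0 ((k : Int) + 1) 1
        = PySem.List.pyRange 0 (k : Int) 1 ++ [(k : Int)] :=
      PySem.List.pyRange_one_succ_right (by exact_mod_cast Nat.zero_le k)
    have hcast : ((k + 1 : Nat) : Int) = (k : Int) + 1 := by push_cast; ring
    rw [hcast, hsr, List.foldl_append, ih, List.map_append, List.foldl_cons, List.foldl_nil]
    have hcontains : ((PySem.Dict.mk (l ++ (PySem.List.pyRange 0 (k : Int) 1).map
        (fun j => ((i, j), c + j)))).contains (i, (k : Int))) = false := by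
      rw [PySem.Dict.contains_mk]
      rw [List.any_eq_false]
      intro p hp
      rcases List.mem_append.mp hp with hp | hp
      · intro he
        exact hfresh p hp (by rw [eq_of_beq he])
      · rcases List.mem_map.mp hp with ⟨j, hj, rfl⟩
        have hjk : j < (k : Int) := (PySem.List.mem_pyRange_one.mp hj).2
        intro he
        have : ((i, j) : Int × Int) = (i, (k : Int)) := eq_of_beq he
        have : j = (k : Int) := (Prod.mk.injEq _ _ _ _ ▸ this).2
        omega
    rw [pv_insert_fresh _ _ _ hcontains]
    refine Prod.ext ?_ ?_
    · show PySem.Dict.mk _ = PySem.Dict.mk _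
      rw [List.append_assoc]
      rfl
    · show _ + 1 = c + ((k : Int) + 1)
      ring

-- the counter after the first n rows is the triangular number n*(n-1)//2
theorem pv_tri_step (n : Nat) :
    PySem.Int.floordiv ((n : Int) * ((n : Int) - 1)) 2 + (n : Int)
      = PySem.Int.floordiv (((n : Int) + 1) * (n : Int)) 2 := by
  rw [PySem.Int.floordiv_eq_ediv_of_pos (by norm_num), PySem.Int.floordiv_eq_ediv_of_pos (by norm_num)]
  have h : ((n : Int) + 1) * (n : Int) = (n : Int) * ((n : Int) - 1) + 2 * (n : Int) := by ring
  omega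

theorem pv_outer (n : Nat) :
    (PySem.List.pyRange 0 (n : Int) 1).foldl
      (fun (st : PySem.Dict (Int × Int) Int × Int) i =>
        (PySem.List.pyRange 0 i 1).foldl
          (fun st j => (st.1.insert (i, j) st.2, st.2 + 1)) st)
      (PySem.Dict.empty, 0)
    = (PySem.Dict.mk (pvPairs n), PySem.Int.floordiv ((n : Int) * ((n : Int) - 1)) 2) := by
  induction n with
  | zero => simp [PySem.List.pyRange_one_eq_nil, pvPairs, PySem.Dict.empty, PySem.Int.floordiv]
  | succ n ih =>
    have hsr : PySem.List.pyRange 0 ((n : Int) + 1) 1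
        = PySem.List.pyRange 0 (n : Int) 1 ++ [(n : Int)] :=
      PySem.List.pyRange_one_succ_right (by exact_mod_cast Nat.zero_le n)
    have hcast : ((n + 1 : Nat) : Int) = (n : Int) + 1 := by push_cast; ring
    rw [hcast, hsr, List.foldl_append, ih, List.foldl_cons, List.foldl_nil]
    have hinner := pv_inner (n : Int) n (pvPairs n)
      (PySem.Int.floordiv ((n : Int) * ((n : Int) - 1)) 2)
      (fun p hp => ne_of_lt (pvPairs_key_lt hp))
    rw [hinner]
    refine Prod.ext ?_ ?_
    · show PySem.Dict.mk _ = PySem.Dict.mk (pvPairs (n + 1))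
      unfold pvPairs
      rw [hcast, hsr, List.flatMap_append]
      simp
    · show _ = PySem.Int.floordiv ((((n : Nat) + 1) : Int) * ((((n : Nat) + 1) : Int) - 1)) 2
      push_cast
      rw [pv_tri_step n]
      ring_nf
theorem pv_main (L : Int) : build_index_dictionary L = build_index_dictionary_alt L := by
  by_cases hL : L ≤ 0
  · simp [build_index_dictionary, build_index_dictionary_alt,
      PySem.List.pyRange_one_eq_nil hL, PySem.Dict.empty]
  · rw [not_le] at hL
    have hL' : L = ((L.toNat : Nat) : Int) := by omega
    rw [build_index_dictionary, build_index_dictionary_alt, hL', pv_outer L.toNat]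
    unfold pvPairs
    simp [List.map_flatMap, Function.comp_def]

-- ===== VERDICT (by name: the statement is the Claim_ definition above) =====
theorem build_index_dictionary_spec : Claim_equal_build_index_dictionary := by
  intro L _
  exact pv_main L
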